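-- pv_equiv track=rewrite | github.com/atharvaagrawal/dsa | Striver-A2Z/12_Greedy_Algorithms/1_Easy/3_Find_Number_of_Coin.py | minPartition
-- ===== SOURCE A (Python) =====
-- def minPartition(N):
--     coin = [1, 2, 5, 10, 20, 50, 100, 200, 500, 2000]
--
--     res = []
--     value = N
--
--     for i in range(len(coin)-1, -1, -1):
--         while coin[i] <= value:
--             res.append(coin[i])
--             value -= coin[i]
--
--     return res
-- ===== SOURCE B (Python) =====
-- def minPartition(N):
--     res = []
--     value = N
--     for coin in (2000, 500, 200, 100, 50, 20, 10, 5, 2, 1):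
--         if coin <= value:
--             q, value = divmod(value, coin)
--             res += [coin] * q
--     return res
-- ===== Notes on version B (the rewrite author's own statement) =====
-- stated objective: simpler
-- what changed: Replaces the per-coin repeated-subtraction while-loop with a single divmod per denomination, materializing all copies of each coin at once with list replication.
import Mathlib
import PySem

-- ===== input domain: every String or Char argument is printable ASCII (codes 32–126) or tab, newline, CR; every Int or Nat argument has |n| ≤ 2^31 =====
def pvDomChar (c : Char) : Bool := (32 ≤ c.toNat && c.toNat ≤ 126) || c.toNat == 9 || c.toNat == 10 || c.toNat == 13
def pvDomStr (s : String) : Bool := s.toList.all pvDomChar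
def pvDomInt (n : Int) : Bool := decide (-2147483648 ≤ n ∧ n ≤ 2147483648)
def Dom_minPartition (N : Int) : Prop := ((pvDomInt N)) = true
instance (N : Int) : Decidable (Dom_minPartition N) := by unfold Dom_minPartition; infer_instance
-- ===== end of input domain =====

-- B replaces A's per-coin repeated-subtraction while-loop by one divmod per denomination
-- (simpler: one arithmetic step per coin; same return value).

-- ===== PORT A =====
-- the inner 'while coin[i] <= value: res.append(coin[i]); value -= coin[i]' loop;
-- terminates because each step subtracts c ≥ 1 from value while 1 ≤ c ≤ value.
def pvWhileA (c : Int) (value : Int) (res : List Int) : List Int × Int :=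
  if _h : c ≤ value ∧ 1 ≤ c then pvWhileA c (value - c) (res ++ [c]) else (res, value)
termination_by value.toNat
decreasing_by omega

def pvCoinsA : List Int := [1, 2, 5, 10, 20, 50, 100, 200, 500, 2000]

def minPartition (N : Int) : List Int :=
  -- for i in range(len(coin)-1, -1, -1): inner while loop
  -- coin[i] is always in range here, so pyGet? is defaulted with .getD 0 (exact on this list)
  let st := (PySem.List.pyRange (pvCoinsA.length - 1) (-1) (-1)).foldl
    (fun (st : List Int × Int) (i : Int) => pvWhileA ((PySem.List.pyGet? pvCoinsA i).getD 0) st.2 st.1)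
    ([], N)
  st.1

-- ===== PORT B =====
def minPartition_alt (N : Int) : List Int :=
  let st := ([2000, 500, 200, 100, 50, 20, 10, 5, 2, 1] : List Int).foldl
    (fun (st : List Int × Int) (coin : Int) =>
      if coin ≤ st.2 then
        -- q, value = divmod(value, coin); res += [coin] * q  (q ≥ 1 > 0 here, so toNat is exact)
        (st.1 ++ List.replicate (PySem.Int.floordiv st.2 coin).toNat coin, PySem.Int.mod st.2 coin)
      else st)
    ([], N)
  st.1

-- ===== PRECONDITION & SPEC =====
def Spec_minPartition (N : Int) (out : List Int) : Prop := out = minPartition_alt N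
instance (N : Int) (out : List Int) : Decidable (Spec_minPartition N out) := by unfold Spec_minPartition; infer_instance

-- ===== CLAIM =====
def Claim_equal_minPartition : Prop := ∀ (N : Int), Dom_minPartition N → Spec_minPartition N (minPartition N)

-- ===== LEMMAS AND PROOFS =====
theorem pvWhileA_eq (c v : Int) (res : List Int) (hc : 1 ≤ c) :
    pvWhileA c v res =
      if c ≤ v then (res ++ List.replicate (PySem.Int.floordiv v c).toNat c, PySem.Int.mod v c)
      else (res, v) := by
  induction v, res using pvWhileA.induct c with
  | case1 v res h ih =>
    rw [pvWhileA, dif_pos h, ih, if_pos h.1]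
    have hc1 : (1:Int) ≤ c := h.2
    have hfd : PySem.Int.floordiv v c = PySem.Int.floordiv (v - c) c + 1 := by
      rw [PySem.Int.floordiv_eq_ediv_of_pos (by omega), PySem.Int.floordiv_eq_ediv_of_pos (by omega)]
      have : v = (v - c) + 1 * c := by ring
      rw [this]
      rw [Int.add_mul_ediv_right _ _ (by omega : c ≠ 0)]
      ring_nf
    have hmd : PySem.Int.mod v c = PySem.Int.mod (v - c) c := by
      rw [PySem.Int.mod_eq_emod_of_pos (by omega), PySem.Int.mod_eq_emod_of_pos (by omega)]
      exact (Int.sub_emod_right v c).symm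
    have hq0 : 0 ≤ PySem.Int.floordiv (v - c) c := by
      rw [PySem.Int.floordiv_eq_ediv_of_pos (by omega)]
      exact Int.ediv_nonneg (by omega) (by omega)
    by_cases h2 : c ≤ v - c
    · rw [if_pos h2, hfd, hmd, Int.toNat_add hq0 (by omega)]
      simp [List.replicate_succ, List.append_assoc]
    · rw [if_neg h2, hfd, hmd]
      have : PySem.Int.floordiv (v - c) c = 0 := by
        rw [PySem.Int.floordiv_eq_ediv_of_pos (by omega)]
        exact Int.ediv_eq_zero_of_lt (by omega) (by omega)
      rw [this]
      have : PySem.Int.mod (v - c) c = v - c := by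
        rw [PySem.Int.mod_eq_emod_of_pos (by omega)]
        exact Int.emod_eq_of_lt (by omega) (by omega)
      simp [this, List.replicate_succ]
  | case2 v res h =>
    rw [pvWhileA, dif_neg h]
    have : ¬ c ≤ v := fun hle => h ⟨hle, hc⟩
    rw [if_neg this]

-- ===== VERDICT =====
theorem pvStepA_eq (c : Int) (hc : 1 ≤ c) (st : List Int × Int) :
    pvWhileA c st.2 st.1 =
      if c ≤ st.2 then
        (st.1 ++ List.replicate (PySem.Int.floordiv st.2 c).toNat c, PySem.Int.mod st.2 c)
      else st := by
  rw [pvWhileA_eq _ _ _ hc]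

theorem minPartition_spec : Claim_equal_minPartition := by
  intro N _
  unfold Spec_minPartition minPartition minPartition_alt
  have hr : PySem.List.pyRange ((pvCoinsA.length : Int) - 1) (-1) (-1) = [9, 8, 7, 6, 5, 4, 3, 2, 1, 0] := by
    norm_num [PySem.List.pyRange_neg_one, pvCoinsA]
    decide
  rw [hr, ← List.foldl_map (f := fun i => (PySem.List.pyGet? pvCoinsA i).getD 0)
      (g := fun (st : List Int × Int) (c : Int) => pvWhileA c st.2 st.1)]
  have hmap : ([9, 8, 7, 6, 5, 4, 3, 2, 1, 0] : List Int).map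
      (fun i => (PySem.List.pyGet? pvCoinsA i).getD 0) = [2000, 500, 200, 100, 50, 20, 10, 5, 2, 1] := by
    decide
  rw [hmap]
  exact congrArg Prod.fst (PySem.List.foldl_congr_mem _ _ _ _
    (fun acc x hx => pvStepA_eq x (by fin_cases hx <;> norm_num) acc))
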